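-- pv_equiv track=rewrite | github.com/recalling-Hugh/cs | cs101/T01011.py | combinef
-- ===== SOURCE A (Python) =====
-- def combinef(content,target):
--     for c in content:
--         ctemp=content[:]
--         ctemp.remove(c)
--         temp=target[:]
--         flag=False
--         for i in c:
--             try:
--                 temp.remove(i)
--             except ValueError:
--                 flag=True
--                 break
--         if flag:
--             continue
--         if not temp:
--             return True
--         if combinef(ctemp,temp):
--             return True
--     return False
-- ===== SOURCE B (Python) =====
-- def _msub(rem, c):
--     out = list(rem)
--     for x in c:
--         if x not in out:
--             return None
--         out.remove(x)
--     return out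
--
-- def combinef(content, target):
--     def go(items, rem):
--         if not items:
--             return False
--         c, rest = items[0], items[1:]
--         r = _msub(rem, c)
--         if r is not None and (not r or go(rest, r)):
--             return True
--         return go(rest, rem)
--     return go(content, target)
-- ===== Notes on version B (the rewrite author's own statement) =====
-- stated objective: faster
-- what changed: Replaced A's factorial pick-any-element-first permutation search (recursing on content with the chosen element removed) by a binary take-or-skip subset recursion over the list head, so each subset of content is explored once instead of once per ordering.
import Mathlib
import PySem

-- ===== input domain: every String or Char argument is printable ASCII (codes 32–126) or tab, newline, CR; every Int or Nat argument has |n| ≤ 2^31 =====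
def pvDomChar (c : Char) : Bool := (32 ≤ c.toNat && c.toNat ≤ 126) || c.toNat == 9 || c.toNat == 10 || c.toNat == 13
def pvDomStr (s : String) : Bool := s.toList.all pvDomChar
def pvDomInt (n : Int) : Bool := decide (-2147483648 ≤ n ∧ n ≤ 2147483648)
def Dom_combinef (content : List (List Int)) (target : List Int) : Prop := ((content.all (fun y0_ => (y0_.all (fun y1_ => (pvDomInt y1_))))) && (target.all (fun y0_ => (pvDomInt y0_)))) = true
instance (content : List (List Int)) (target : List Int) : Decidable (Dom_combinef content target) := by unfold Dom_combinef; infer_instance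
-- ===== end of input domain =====

-- B replaces A's pick-any-remaining-element-first search by a take-or-skip subset
-- recursion on the head of the list (explores each subset once instead of once per ordering).


-- ===== PORT A =====
-- A's inner loop: `for i in c: try temp.remove(i) except ValueError: flag=True; break`
def subAll (temp : List Int) (c : List Int) : Option (List Int) :=
  match c with
  | [] => some temp
  | i :: is =>
    match PySem.List.remove? temp i with
    | none => none
    | some t => subAll t is

-- the `for c in content` loop; iter carries membership so that `ctemp = content.remove(c)` shrinks
def combinefLoop (content : List (List Int)) (target : List Int)
    (iter : List {x // x ∈ content}) : Bool :=
  match iter with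
  | [] => false
  | ⟨c, _hc⟩ :: rest =>
    match subAll target c with
    | none => combinefLoop content target rest          -- flag: continue
    | some temp =>
      if temp = [] then true
      else if combinefLoop (content.erase c) temp (content.erase c).attach then true
      else combinefLoop content target rest
termination_by (content.length, iter.length)
decreasing_by
  · exact Prod.Lex.right _ (by simp)
  · refine Prod.Lex.left _ _ ?_
    have h1 := List.length_erase_of_mem _hc
    have h2 : content.length ≠ 0 := fun h0 => absurd _hc (by simp [List.length_eq_zero_iff.mp h0])
    omega

def combinef (content : List (List Int)) (target : List Int) : Bool :=
  combinefLoop content target content.attach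

-- ===== PORT B =====
-- B's helper _msub: membership test then remove-first-occurrence
def msub (rem : List Int) (c : List Int) : Option (List Int) :=
  match c with
  | [] => some rem
  | x :: xs => if x ∈ rem then msub (rem.erase x) xs else none

-- B's take-or-skip recursion on the head of items
def goAlt (items : List (List Int)) (rem : List Int) : Bool :=
  match items with
  | [] => false
  | c :: rest =>
    match msub rem c with
    | some r => if r = [] then true else if goAlt rest r then true else goAlt rest rem
    | none => goAlt rest rem

def combinef_alt (content : List (List Int)) (target : List Int) : Bool :=
  goAlt content target

-- ===== PRECONDITION & SPEC =====
def Spec_combinef (content : List (List Int)) (target : List Int) (out : Bool) : Prop := out = combinef_alt content target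
instance (content : List (List Int)) (target : List Int) (out : Bool) : Decidable (Spec_combinef content target out) := by unfold Spec_combinef; infer_instance

-- ===== CLAIM (what is proved, stated in full; the proofs are below) =====
def Claim_equal_combinef : Prop := ∀ (content : List (List Int)) (target : List Int), Dom_combinef content target → Spec_combinef content target (combinef content target)

-- ===== LEMMAS AND PROOFS =====

-- common specification: some nonempty sub-multiset of content sums (as int-multisets) to target
def P (content : List (List Int)) (target : List Int) : Prop :=
  ∃ s : Multiset (List Int), s ≤ (content : Multiset (List Int)) ∧ s ≠ 0 ∧
    (s.map (fun l => Multiset.ofList l)).sum = (target : Multiset Int)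

theorem msub_eq_subAll (c rem : List Int) : msub rem c = subAll rem c := by
  induction c generalizing rem with
  | nil => rfl
  | cons x xs ih =>
    show (if x ∈ rem then msub (rem.erase x) xs else none) = subAll rem (x :: xs)
    by_cases h : x ∈ rem
    · simp only [subAll, PySem.List.remove?_eq_some_erase rem x h, if_pos h]
      exact ih _
    · simp only [subAll, (PySem.List.remove?_eq_none_iff rem x).mpr h, if_neg h]

theorem subAll_isSome (c rem : List Int) :
    (subAll rem c).isSome = true ↔ (c : Multiset Int) ≤ (rem : Multiset Int) := by
  induction c generalizing rem with
  | nil => simp [subAll]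
  | cons x xs ih =>
    by_cases h : x ∈ rem
    · simp only [subAll, PySem.List.remove?_eq_some_erase rem x h]
      rw [ih, show ((x :: xs : List Int) : Multiset Int) = x ::ₘ (xs : Multiset Int) from rfl]
      have hrem : (rem : Multiset Int) = x ::ₘ ((rem : Multiset Int).erase x) :=
        (Multiset.cons_erase (by simpa using h)).symm
      constructor
      · intro hs
        rw [hrem]
        exact Multiset.cons_le_cons _ (by rw [Multiset.coe_erase]; exact hs)
      · intro hle
        rw [← Multiset.coe_erase]
        exact (Multiset.cons_le_cons_iff x).mp (by rw [← hrem]; exact hle)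
    · simp only [subAll, (PySem.List.remove?_eq_none_iff rem x).mpr h]
      simp only [Option.isSome_none, Bool.false_eq_true, false_iff]
      intro hle
      have hx : (x : ℤ) ∈ (rem : Multiset ℤ) := Multiset.mem_of_le hle (by simp)
      exact h (by simpa using hx)

theorem subAll_some_val (c rem r : List Int) (h : subAll rem c = some r) :
    (r : Multiset Int) = (rem : Multiset Int) - (c : Multiset Int) := by
  induction c generalizing rem with
  | nil => simp [subAll] at h; simp [h]
  | cons x xs ih =>
    have hm : x ∈ rem := by
      by_contra hx
      simp [subAll, (PySem.List.remove?_eq_none_iff rem x).mpr hx] at h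
    simp only [subAll, PySem.List.remove?_eq_some_erase rem x hm] at h
    rw [ih _ h, ← Multiset.coe_erase,
      show ((x :: xs : List Int) : Multiset Int) = x ::ₘ (xs : Multiset Int) from rfl,
      Multiset.sub_cons]

theorem le_cons_cases {α : Type} [DecidableEq α] {s t : Multiset α} {a : α}
    (h : s ≤ a ::ₘ t) : s ≤ t ∨ ∃ s', s = a ::ₘ s' ∧ s' ≤ t := by
  by_cases hm : a ∈ s
  · right
    refine ⟨s.erase a, (Multiset.cons_erase hm).symm, ?_⟩
    have := Multiset.erase_le_erase a h
    simpa using this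
  · left
    rw [Multiset.le_iff_count] at h ⊢
    intro b
    have hb := h b
    by_cases hba : b = a
    · subst hba; simp [Multiset.count_eq_zero_of_notMem hm]
    · simpa [Multiset.count_cons, hba] using hb

theorem goAlt_iff (items : List (List Int)) (rem : List Int) :
    goAlt items rem = true ↔
      (∃ s : Multiset (List Int), s ≤ (items : Multiset (List Int)) ∧ s ≠ 0 ∧
        (s.map (fun l => Multiset.ofList l)).sum = (rem : Multiset Int)) := by
  induction items generalizing rem with
  | nil =>
    simp only [goAlt, Bool.false_eq_true, false_iff]
    rintro ⟨s, hle, hne, -⟩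
    exact hne (le_antisymm (by simpa using hle) (Multiset.zero_le s))
  | cons c rest ih =>
    have hcons : ((c :: rest : List (List Int)) : Multiset (List Int))
        = c ::ₘ (rest : Multiset (List Int)) := rfl
    constructor
    · intro h
      simp only [goAlt] at h
      split at h
      · -- msub rem c = some r
        rename_i r hms
        have hrval : (r : Multiset Int) = (rem : Multiset Int) - (c : Multiset Int) :=
          subAll_some_val c rem r (by rw [← msub_eq_subAll]; exact hms)
        have hcle : (c : Multiset Int) ≤ (rem : Multiset Int) := by
          have hiss : (subAll rem c).isSome = true := by rw [← msub_eq_subAll, hms]; rfl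
          exact (subAll_isSome c rem).mp hiss
        by_cases hr0 : r = []
        · refine ⟨{c}, ?_, by simp, ?_⟩
          · rw [hcons]
            exact Multiset.cons_le_cons c (Multiset.zero_le _)
          · simp only [Multiset.map_singleton, Multiset.sum_singleton]
            have h0 : (rem : Multiset Int) - (c : Multiset Int) = 0 := by
              rw [← hrval, hr0]; rfl
            exact le_antisymm hcle (tsub_eq_zero_iff_le.mp h0)
        · rw [if_neg hr0] at h
          by_cases hgr : goAlt rest r = true
          · obtain ⟨s, hle, hne, hsum⟩ := (ih _).mp hgr
            refine ⟨c ::ₘ s, by rw [hcons]; exact Multiset.cons_le_cons _ hle, by simp, ?_⟩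
            rw [Multiset.map_cons, Multiset.sum_cons, hsum, hrval]
            exact add_tsub_cancel_of_le hcle
          · rw [if_neg hgr] at h
            obtain ⟨s, hle, hne, hsum⟩ := (ih _).mp h
            exact ⟨s, by rw [hcons]; exact le_trans hle (Multiset.le_cons_self _ _), hne, hsum⟩
      · -- msub rem c = none
        obtain ⟨s, hle, hne, hsum⟩ := (ih _).mp h
        exact ⟨s, by rw [hcons]; exact le_trans hle (Multiset.le_cons_self _ _), hne, hsum⟩
    · rintro ⟨s, hle, hne, hsum⟩
      rw [hcons] at hle
      simp only [goAlt]
      rcases le_cons_cases hle with hle' | ⟨s', rfl, hle'⟩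
      · -- skip c
        have hrest : goAlt rest rem = true := (ih _).mpr ⟨s, hle', hne, hsum⟩
        split
        · rename_i r hms
          by_cases hr0 : r = []
          · rw [if_pos hr0]
          · rw [if_neg hr0]
            by_cases hgr : goAlt rest r = true
            · rw [if_pos hgr]
            · rw [if_neg hgr]; exact hrest
        · exact hrest
      · -- take c
        rw [Multiset.map_cons, Multiset.sum_cons] at hsum
        have hcle : (c : Multiset Int) ≤ (rem : Multiset Int) := by
          rw [← hsum]; exact le_self_add
        obtain ⟨r, hms⟩ : ∃ r, msub rem c = some r := by
          have hiss := (subAll_isSome c rem).mpr hcle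
          rw [← msub_eq_subAll] at hiss
          exact Option.isSome_iff_exists.mp hiss
        have hrval : (r : Multiset Int) = (rem : Multiset Int) - (c : Multiset Int) :=
          subAll_some_val c rem r (by rw [← msub_eq_subAll]; exact hms)
        have hrs : (s'.map (fun l => Multiset.ofList l)).sum = (r : Multiset Int) := by
          rw [hrval, ← hsum]; simp
        split
        · rename_i r' hms'
          rw [hms'] at hms
          cases hms
          by_cases hs0 : s' = 0
          · have h0 : (r : Multiset Int) = 0 := by rw [← hrs, hs0]; simp
            rw [if_pos (by simpa using h0)]
          · have hgr : goAlt rest r = true := (ih _).mpr ⟨s', hle', hs0, hrs⟩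
            by_cases hr0 : r = []
            · rw [if_pos hr0]
            · rw [if_neg hr0, if_pos hgr]
        · rename_i hnone
          rw [hnone] at hms
          cases hms

theorem erase_beq_eq (content : List (List Int)) (c : List Int) :
    @List.erase _ List.instBEq content c = @List.erase _ instBEqOfDecidableEq content c := by
  induction content with
  | nil => rfl
  | cons h t ih =>
    by_cases hx : h = c
    · subst hx; simp
    · simp [hx, ih]

theorem coe_erase_content (content : List (List Int)) (c : List Int) :
    ((content.erase c : List (List Int)) : Multiset (List Int))
      = (content : Multiset (List Int)).erase c := by
  rw [Multiset.coe_erase]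
  exact congrArg _ (erase_beq_eq content c)

theorem loop_iff (content : List (List Int)) (target : List Int)
    (iter : List {x // x ∈ content}) :
    combinefLoop content target iter = true ↔
      ∃ p ∈ iter, ∃ r, subAll target p.val = some r ∧
        (r = [] ∨ combinef (content.erase p.val) r = true) := by
  induction iter with
  | nil => simp [combinefLoop]
  | cons p rest ih =>
    obtain ⟨c, hc⟩ := p
    rw [combinefLoop]
    split
    · -- subAll target c = none : flag, continue
      rename_i hs
      rw [ih]
      constructor
      · rintro ⟨q, hq, hrest⟩; exact ⟨q, List.mem_cons_of_mem _ hq, hrest⟩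
      · rintro ⟨q, hq, r, hr, hor⟩
        rcases List.mem_cons.mp hq with rfl | hq
        · have hr' : subAll target c = some r := hr
          rw [hs] at hr'; cases hr'
        · exact ⟨q, hq, r, hr, hor⟩
    · rename_i temp hs
      constructor
      · intro h
        by_cases h0 : temp = []
        · exact ⟨⟨c, hc⟩, List.mem_cons_self, temp, hs, Or.inl h0⟩
        · rw [if_neg h0] at h
          by_cases hrec : combinefLoop (content.erase c) temp (content.erase c).attach = true
          · exact ⟨⟨c, hc⟩, List.mem_cons_self, temp, hs, Or.inr hrec⟩
          · rw [if_neg hrec] at h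
            obtain ⟨q, hq, hrest⟩ := ih.mp h
            exact ⟨q, List.mem_cons_of_mem _ hq, hrest⟩
      · rintro ⟨q, hq, r, hr, hor⟩
        rcases List.mem_cons.mp hq with rfl | hq
        · have hr' : subAll target c = some r := hr
          rw [hs] at hr'
          cases hr'
          rcases hor with h0 | hrec
          · rw [if_pos h0]
          · by_cases h0 : temp = []
            · rw [if_pos h0]
            · rw [if_neg h0]
              have hrec' : combinefLoop (content.erase c) temp (content.erase c).attach = true := hrec
              rw [if_pos hrec']
        · have hrest := ih.mpr ⟨q, hq, r, hr, hor⟩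
          by_cases h0 : temp = []
          · rw [if_pos h0]
          · rw [if_neg h0]
            by_cases hrec : combinefLoop (content.erase c) temp (content.erase c).attach = true
            · rw [if_pos hrec]
            · rw [if_neg hrec]; exact hrest

theorem A_iff : ∀ (n : ℕ) (content : List (List Int)) (target : List Int),
    content.length = n → (combinef content target = true ↔ P content target) := by
  intro n
  induction n using Nat.strong_induction_on with
  | _ n IH =>
    intro content target hlen
    rw [combinef, loop_iff]
    constructor
    · rintro ⟨⟨c, hc⟩, -, r, hr, hor⟩
      have hcle : (c : Multiset Int) ≤ (target : Multiset Int) := by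
        have : (subAll target c).isSome = true := by rw [hr]; rfl
        exact (subAll_isSome c target).mp this
      have hrval : (r : Multiset Int) = (target : Multiset Int) - (c : Multiset Int) :=
        subAll_some_val c target r hr
      rcases hor with rfl | hrec
      · refine ⟨{c}, Multiset.singleton_le.mpr (by simpa using hc), by simp, ?_⟩
        simp only [Multiset.map_singleton, Multiset.sum_singleton]
        have h0 : (target : Multiset Int) - (c : Multiset Int) = 0 := by rw [← hrval]; rfl
        exact le_antisymm hcle (tsub_eq_zero_iff_le.mp h0)
      · have hlt : (content.erase c).length < n := by
          rw [← hlen, List.length_erase_of_mem hc]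
          have : content.length ≠ 0 := fun h0 =>
            absurd hc (by simp [List.length_eq_zero_iff.mp h0])
          omega
        obtain ⟨s, hle, hne, hsum⟩ := (IH _ hlt _ r rfl).mp hrec
        refine ⟨c ::ₘ s, ?_, by simp, ?_⟩
        · have hstep : (c ::ₘ s : Multiset (List Int))
              ≤ c ::ₘ ((content : Multiset (List Int)).erase c) :=
            Multiset.cons_le_cons _ (by rw [← coe_erase_content]; exact hle)
          rwa [Multiset.cons_erase (by simpa using hc)] at hstep
        · rw [Multiset.map_cons, Multiset.sum_cons, hsum, hrval]
          exact add_tsub_cancel_of_le hcle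
    · rintro ⟨s, hle, hne, hsum⟩
      obtain ⟨c, hcs⟩ := Multiset.exists_mem_of_ne_zero hne
      have hc : c ∈ content := by simpa using Multiset.mem_of_le hle hcs
      have hcle : (c : Multiset Int) ≤ (target : Multiset Int) := by
        rw [← hsum]
        exact Multiset.le_sum_of_mem (Multiset.mem_map_of_mem _ hcs)
      obtain ⟨r, hr⟩ : ∃ r, subAll target c = some r :=
        Option.isSome_iff_exists.mp ((subAll_isSome c target).mpr hcle)
      have hrval : (r : Multiset Int) = (target : Multiset Int) - (c : Multiset Int) :=
        subAll_some_val c target r hr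
      refine ⟨⟨c, hc⟩, List.mem_attach _ _, r, hr, ?_⟩
      by_cases hs0 : s.erase c = 0
      · left
        have hsc : s = {c} := by
          have hd := Multiset.cons_erase hcs
          rw [hs0] at hd; simpa using hd.symm
        rw [hsc] at hsum
        simp only [Multiset.map_singleton, Multiset.sum_singleton] at hsum
        have h0 : (r : Multiset Int) = 0 := by rw [hrval, hsum]; simp
        simpa using h0
      · right
        have hlt : (content.erase c).length < n := by
          rw [← hlen, List.length_erase_of_mem hc]
          have : content.length ≠ 0 := fun h0 =>
            absurd hc (by simp [List.length_eq_zero_iff.mp h0])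
          omega
        apply (IH _ hlt _ r rfl).mpr
        refine ⟨s.erase c, ?_, hs0, ?_⟩
        · rw [coe_erase_content]
          exact Multiset.erase_le_erase c hle
        · have hdecomp : s = c ::ₘ s.erase c := (Multiset.cons_erase hcs).symm
          rw [hdecomp, Multiset.map_cons, Multiset.sum_cons] at hsum
          rw [hrval, ← hsum]
          simp

-- ===== VERDICT (by name: the statement is the Claim_ definition above) =====
theorem combinef_spec : Claim_equal_combinef := by
  intro content target _
  unfold Spec_combinef
  have hA := A_iff content.length content target rfl
  have hB : combinef_alt content target = true ↔ P content target := goAlt_iff content target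
  rw [Bool.eq_iff_iff, hA, hB]
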